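-- pv_equiv track=rewrite | github.com/doheuncho/TIL | LeetCode/Random problem/Concatenation_of_Consecutive_Binary_Numbers.py | concatenatedBinary
-- ===== SOURCE A (Python) =====
-- def concatenatedBinary(n: int) -> int:
--     modulo = 10 ** 9 + 7
--     result = degree = 0
--
--     for i in range(1, n+1):
--         # if i is power of 2
--         if not i & (i - 1):
--             degree += 1
--         result = (result * (2 ** degree) + i) % modulo
--
--     return result
-- ===== SOURCE B (Python) =====
-- def concatenatedBinary(n: int) -> int:
--     s = "".join(bin(i)[2:] for i in range(1, n + 1))
--     return int(s, 2) % (10 ** 9 + 7) if s else 0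
-- ===== Notes on version B (the rewrite author's own statement) =====
-- stated objective: simpler
-- what changed: Instead of a per-iteration modular multiply-add with a power-of-two bit trick to track the shift width, B joins the binary strings of 1..n, parses the whole concatenation once with int(s, 2) and takes one final mod (returning 0 when the string is empty).
import Mathlib
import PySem

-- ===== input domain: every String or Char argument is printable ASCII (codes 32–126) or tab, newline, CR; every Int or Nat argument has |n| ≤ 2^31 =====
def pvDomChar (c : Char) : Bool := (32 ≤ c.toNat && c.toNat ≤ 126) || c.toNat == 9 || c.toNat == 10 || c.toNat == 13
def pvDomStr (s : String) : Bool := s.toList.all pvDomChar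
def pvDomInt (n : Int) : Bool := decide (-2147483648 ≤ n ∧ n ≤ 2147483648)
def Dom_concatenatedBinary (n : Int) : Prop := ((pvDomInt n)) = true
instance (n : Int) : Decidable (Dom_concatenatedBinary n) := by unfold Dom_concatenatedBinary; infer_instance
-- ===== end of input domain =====

-- B joins the binary strings of 1..n and parses the concatenation once (one final mod),
-- instead of A's per-step modular multiply-add with a power-of-two test; objective: simpler.

-- ===== PORT A =====
-- 'i & (i - 1)' is Int.land; '% modulo' with the positive modulo 10^9+7 is Int.emod (= Python %);
-- '2 ** degree' with degree ≥ 0 (it only ever increments from 0) is 2 ^ degree.toNat.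
def concatenatedBinary (n : Int) : Int :=
  let modulo : Int := 10 ^ 9 + 7
  ((PySem.List.pyRange 1 (n + 1) 1).foldl
    (fun (st : Int × Int) i =>
      let degree := if Int.land i (i - 1) = 0 then st.2 + 1 else st.2
      ((st.1 * 2 ^ degree.toNat + i) % modulo, degree))
    (0, 0)).1

-- ===== PORT B =====
-- bin(m)[2:] for m ≥ 1: most-significant-first binary digits (hand port, exact for m ≥ 1;
-- pvBin also covers bin(0)[2:] = "0", though the loop only ever calls it with m ≥ 1).
def pvBits : Nat → List Char
  | 0 => []
  | (k + 1) => pvBits ((k + 1) / 2) ++ [if (k + 1) % 2 = 1 then '1' else '0']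
decreasing_by omega

def pvBin (m : Nat) : List Char := if m = 0 then ['0'] else pvBits m

-- int(s, 2): hand port of the base-2 parse; exact here since s contains only '0'/'1' digits.
def concatenatedBinary_alt (n : Int) : Int :=
  let s := (PySem.List.pyRange 1 (n + 1) 1).foldl (fun acc i => acc ++ pvBin i.toNat) []
  if s = [] then 0
  else (s.foldl (fun acc c => acc * 2 + (if c = '1' then 1 else 0)) (0 : Int)) % (10 ^ 9 + 7)

-- ===== PRECONDITION & SPEC =====
def Spec_concatenatedBinary (n : Int) (out : Int) : Prop := out = concatenatedBinary_alt n
instance (n : Int) (out : Int) : Decidable (Spec_concatenatedBinary n out) := by unfold Spec_concatenatedBinary; infer_instance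

-- ===== CLAIM (what is proved, stated in full; the proofs are below) =====
def Claim_equal_concatenatedBinary : Prop := ∀ (n : Int), Dom_concatenatedBinary n → Spec_concatenatedBinary n (concatenatedBinary n)

-- ===== LEMMAS AND PROOFS =====

-- length of the binary digits: one recursion step per halving
theorem pvBits_len (m : Nat) (h : 1 ≤ m) :
    (pvBits m).length = (pvBits (m / 2)).length + 1 := by
  obtain ⟨k, rfl⟩ : ∃ k, m = k + 1 := ⟨m - 1, by omega⟩
  simp [pvBits]

theorem pvBits_ne_nil (m : Nat) (h : 1 ≤ m) : pvBits m ≠ [] := by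
  obtain ⟨k, rfl⟩ : ∃ k, m = k + 1 := ⟨m - 1, by omega⟩
  simp [pvBits]

-- the crux: i & (i-1) == 0 detects exactly the steps where the bit length grows
theorem pvLen_step (i : Nat) (h : 1 ≤ i) :
    (pvBits i).length = (pvBits (i - 1)).length + (if i &&& (i - 1) = 0 then 1 else 0) := by
  induction i using Nat.strong_induction_on with
  | _ i ih =>
    rcases Nat.lt_or_ge i 2 with h2 | h2
    · interval_cases i
      · simp [pvBits]
    · rcases Nat.mod_two_eq_zero_or_one i with hp | hp
      · -- i = 2j, j ≥ 1: i & (i-1) = 2*(j & (j-1)), reduce to the IH at j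
        obtain ⟨j, rfl⟩ : ∃ j, i = 2 * j := ⟨i / 2, by omega⟩
        have hj : 1 ≤ j := by omega
        have hland : 2 * j &&& (2 * j - 1) = 2 * (j &&& (j - 1)) := by
          have h1 : 2 * j = Nat.bit false j := (Nat.bit_false_apply j).symm
          have h2' : 2 * j - 1 = Nat.bit true (j - 1) := by rw [Nat.bit_true_apply]; omega
          rw [h2', h1, Nat.land_bit]
          simp [Nat.bit_false_apply]
        have hL1 : (pvBits (2 * j)).length = (pvBits j).length + 1 := by
          have := pvBits_len (2 * j) (by omega)
          simpa [Nat.mul_div_cancel_left j (by norm_num : 0 < 2)] using this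
        have hL2 : (pvBits (2 * j - 1)).length = (pvBits (j - 1)).length + 1 := by
          have := pvBits_len (2 * j - 1) (by omega)
          have hdiv : (2 * j - 1) / 2 = j - 1 := by omega
          simpa [hdiv] using this
        have hIH := ih j (by omega) hj
        rw [hland, hL1, hL2, hIH]
        by_cases hc : j &&& (j - 1) = 0 <;> simp [hc]
      · -- i = 2j+1, j ≥ 1: i & (i-1) = 2j ≠ 0 and the bit length is unchanged
        obtain ⟨j, rfl⟩ : ∃ j, i = 2 * j + 1 := ⟨i / 2, by omega⟩
        have hj : 1 ≤ j := by omega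
        have hland : (2 * j + 1) &&& (2 * j + 1 - 1) = 2 * j := by
          have h1 : 2 * j + 1 = Nat.bit true j := (Nat.bit_true_apply j).symm
          have h2' : 2 * j + 1 - 1 = Nat.bit false j := by rw [Nat.bit_false_apply]; omega
          rw [h2', h1, Nat.land_bit]
          simp [Nat.bit_false_apply, Nat.and_self]
        have hL1 : (pvBits (2 * j + 1)).length = (pvBits j).length + 1 := by
          have := pvBits_len (2 * j + 1) (by omega)
          have hdiv : (2 * j + 1) / 2 = j := by omega
          simpa [hdiv] using this
        have hL2 : (pvBits (2 * j + 1 - 1)).length = (pvBits j).length + 1 := by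
          have := pvBits_len (2 * j + 1 - 1) (by omega)
          have hdiv : (2 * j + 1 - 1) / 2 = j := by omega
          simpa [hdiv] using this
        rw [hland, hL1, hL2]
        have hnz : 2 * j ≠ 0 := by omega
        simp [hnz]

-- parsing the binary digits of i on top of an accumulator
theorem pvBits_val (i : Nat) : ∀ acc : Int,
    (pvBits i).foldl (fun acc c => acc * 2 + (if c = '1' then 1 else 0)) acc
      = acc * 2 ^ (pvBits i).length + i := by
  induction i using Nat.strong_induction_on with
  | _ i ih =>
    intro acc
    rcases Nat.eq_zero_or_pos i with rfl | hpos
    · simp [pvBits]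
    · obtain ⟨k, rfl⟩ : ∃ k, i = k + 1 := ⟨i - 1, by omega⟩
      have hunf : pvBits (k + 1) = pvBits ((k + 1) / 2) ++ [if (k + 1) % 2 = 1 then '1' else '0'] := by
        rw [pvBits]
      rw [hunf, List.foldl_append]
      rw [ih ((k + 1) / 2) (by omega) acc]
      have hbit : (if (if (k + 1) % 2 = 1 then '1' else '0') = '1' then (1 : Int) else 0)
          = (((k + 1) % 2 : Nat) : Int) := by
        rcases Nat.mod_two_eq_zero_or_one (k + 1) with h | h <;> simp [h]
      simp only [List.foldl_cons, List.foldl_nil, List.length_append, List.length_cons,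
        List.length_nil, hbit]
      have hk : ((k + 1 : Nat) : Int) = 2 * (((k + 1) / 2 : Nat) : Int) + (((k + 1) % 2 : Nat) : Int) := by
        have h' : 2 * ((k + 1) / 2) + (k + 1) % 2 = k + 1 := by omega
        exact_mod_cast h'.symm
      rw [pow_succ, hk]
      ring

-- true concatenated value and concatenated digit list of 1..k
def pvW : Nat → Int
  | 0 => 0
  | (k + 1) => pvW k * 2 ^ (pvBits (k + 1)).length + (k + 1)

def pvS : Nat → List Char
  | 0 => []
  | (k + 1) => pvS k ++ pvBits (k + 1)

theorem pvS_ne_nil (k : Nat) (h : 1 ≤ k) : pvS k ≠ [] := by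
  obtain ⟨m, rfl⟩ : ∃ m, k = m + 1 := ⟨k - 1, by omega⟩
  simp [pvS, pvBits_ne_nil (m + 1) (by omega)]

theorem pvS_val (k : Nat) :
    (pvS k).foldl (fun acc c => acc * 2 + (if c = '1' then 1 else 0)) 0 = pvW k := by
  induction k with
  | zero => simp [pvS, pvW]
  | succ m ih =>
    rw [show pvS (m + 1) = pvS m ++ pvBits (m + 1) from rfl, List.foldl_append, ih,
        pvBits_val (m + 1) (pvW m)]
    simp [pvW]

-- folding a value already reduced mod m gives the same residue
theorem pvModStep (a b c m : Int) : ((a % m) * b + c) % m = (a * b + c) % m := by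
  have h : (a % m) ≡ a [ZMOD m] := Int.emod_emod_of_dvd a dvd_rfl
  exact (h.mul_right b).add_right c

theorem pvCastLand (a b : Nat) : Int.land (a : Int) (b : Int) = ((a &&& b : Nat) : Int) := by
  simp [Int.land]

-- A's loop invariant: state after 1..k is (pvW k mod M, bit length of k)
theorem pvA_inv (k : Nat) :
    ((PySem.List.pyRange 1 ((k : Int) + 1) 1).foldl
      (fun (st : Int × Int) i =>
        let degree := if Int.land i (i - 1) = 0 then st.2 + 1 else st.2
        ((st.1 * 2 ^ degree.toNat + i) % (10 ^ 9 + 7), degree))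
      (0, 0))
    = (pvW k % (10 ^ 9 + 7), ((pvBits k).length : Int)) := by
  induction k with
  | zero => simp [PySem.List.pyRange_one_eq_nil, pvW, pvBits]
  | succ m ih =>
    have hsplit : PySem.List.pyRange 1 (((m + 1 : Nat) : Int) + 1) 1
        = PySem.List.pyRange 1 ((m : Int) + 1) 1 ++ [(m : Int) + 1] := by
      have h1 : ((m + 1 : Nat) : Int) + 1 = ((m : Int) + 1) + 1 := by push_cast; ring
      rw [h1, PySem.List.pyRange_one_succ_right (by omega)]
    rw [hsplit, List.foldl_append, ih]
    simp only [List.foldl_cons, List.foldl_nil]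
    have hc2 : ((m : Int) + 1 - 1) = (m : Int) := by ring
    have hc3 : ((m : Int) + 1) = ((m + 1 : Nat) : Int) := by push_cast; ring
    rw [hc2, hc3, pvCastLand (m + 1) m]
    have hstep := pvLen_step (m + 1) (by omega)
    simp only [Nat.add_sub_cancel] at hstep
    by_cases hc : (m + 1) &&& m = 0
    · rw [if_pos hc] at hstep
      have hc' : (((m + 1) &&& m : Nat) : Int) = 0 := by exact_mod_cast hc
      simp only [hc', if_true]
      have hdeg : ((pvBits m).length : Int) + 1 = ((pvBits (m + 1)).length : Int) := by omega
      rw [hdeg]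
      simp only [Int.toNat_natCast, Prod.mk.injEq]
      refine ⟨?_, by simp⟩
      rw [pvModStep, pvW]
      norm_cast
    · rw [if_neg hc] at hstep
      have hc' : (((m + 1) &&& m : Nat) : Int) ≠ 0 := by exact_mod_cast hc
      simp only [if_neg hc']
      have hdeg : ((pvBits m).length : Int) = ((pvBits (m + 1)).length : Int) := by omega
      rw [hdeg]
      simp only [Int.toNat_natCast, Prod.mk.injEq]
      refine ⟨?_, by simp⟩
      rw [pvModStep, pvW]
      norm_cast

-- B's loop builds exactly the concatenated digit list
theorem pvB_inv (k : Nat) : ∀ acc : List Char,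
    (PySem.List.pyRange 1 ((k : Int) + 1) 1).foldl (fun acc i => acc ++ pvBin i.toNat) acc
      = acc ++ pvS k := by
  induction k with
  | zero => intro acc; simp [PySem.List.pyRange_one_eq_nil, pvS]
  | succ m ih =>
    intro acc
    have hsplit : PySem.List.pyRange 1 (((m + 1 : Nat) : Int) + 1) 1
        = PySem.List.pyRange 1 ((m : Int) + 1) 1 ++ [(m : Int) + 1] := by
      have h1 : ((m + 1 : Nat) : Int) + 1 = ((m : Int) + 1) + 1 := by push_cast; ring
      rw [h1, PySem.List.pyRange_one_succ_right (by omega)]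
    rw [hsplit, List.foldl_append, ih]
    simp only [List.foldl_cons, List.foldl_nil]
    have ht : ((m : Int) + 1).toNat = m + 1 := by omega
    rw [ht, show pvBin (m + 1) = pvBits (m + 1) from by simp [pvBin], pvS, List.append_assoc]

-- ===== VERDICT (by name: the statement is the Claim_ definition above) =====
theorem concatenatedBinary_spec : Claim_equal_concatenatedBinary := by
  intro n _
  unfold Spec_concatenatedBinary concatenatedBinary concatenatedBinary_alt
  dsimp only
  by_cases hn : n ≤ 0
  · rw [PySem.List.pyRange_one_eq_nil (by omega)]
    simp
  · have hk : n = ((n.toNat : Nat) : Int) := by omega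
    have hk1 : 1 ≤ n.toNat := by omega
    rw [hk, pvA_inv n.toNat, pvB_inv n.toNat []]
    simp only [List.nil_append]
    rw [if_neg (pvS_ne_nil n.toNat hk1), pvS_val n.toNat]
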